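-- pv_equiv track=rewrite | github.com/aarant/luvdis | luvdis/analyze.py | find_bounds
-- ===== SOURCE A (Python) =====
-- from bisect import bisect_left, bisect_right
--
-- def find_bounds(l, low, high):
--     """ Yields ordered elements x from l such that low <= x < high.
--
--     Args:
--         l (list): (Sorted) list to search.
--         low: Minimum value to yield.
--         high: Value to stop before.
--     """
--     i = bisect_left(l, low)
--     if i == len(l):
--         yield from []
--     for j in range(i, len(l)):
--         if l[j] >= high:
--             break
--         yield l[j]
-- ===== SOURCE B (Python) =====
-- from bisect import bisect_left
--
-- def find_bounds(l, low, high):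
--     """ Yields ordered elements x from l such that low <= x < high.
--
--     Args:
--         l (list): (Sorted) list to search.
--         low: Minimum value to yield.
--         high: Value to stop before.
--     """
--     i = bisect_left(l, low)
--     j = bisect_left(l, high)
--     yield from l[i:j]
-- ===== Notes on version B (the rewrite author's own statement) =====
-- stated objective: simpler
-- what changed: Both boundary indices are found by binary search (a second bisect_left locates the upper bound) and the slice l[i:j] is yielded directly, eliminating A's element-by-element scan-and-break comparison loop (and its dead 'if i == len(l)' branch) entirely.
-- outside the precondition, e.g. on find_bounds([0, 5, 0, 0], 0, 3): A returns [0], B returns [0, 5, 0, 0]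
import Mathlib
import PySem

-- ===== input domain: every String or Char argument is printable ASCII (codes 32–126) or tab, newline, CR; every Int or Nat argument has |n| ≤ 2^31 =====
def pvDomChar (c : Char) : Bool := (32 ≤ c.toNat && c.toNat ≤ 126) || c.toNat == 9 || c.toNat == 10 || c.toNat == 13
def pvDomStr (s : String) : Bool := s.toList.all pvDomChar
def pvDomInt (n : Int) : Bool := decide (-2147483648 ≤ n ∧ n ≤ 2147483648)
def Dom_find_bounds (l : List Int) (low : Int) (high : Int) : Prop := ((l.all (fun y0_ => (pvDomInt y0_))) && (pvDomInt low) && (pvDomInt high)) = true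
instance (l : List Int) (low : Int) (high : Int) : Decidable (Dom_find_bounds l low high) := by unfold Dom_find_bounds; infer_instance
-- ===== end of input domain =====

-- B finds BOTH boundary indices by binary search and returns the slice l[i:j] directly,
-- with no comparison loop (simpler; return value of the generators, fully consumed).

-- Shared helper: Python's bisect.bisect_left (both Pythons call the library routine).
-- while lo < hi: mid = (lo+hi)//2; if a[mid] < x: lo = mid+1 else: hi = mid
def bisectGo (a : List Int) (x : Int) (lo hi : Nat) : Nat :=
  if _h : lo < hi then
    let mid := (lo + hi) / 2
    if a.getD mid 0 < x then bisectGo a x (mid + 1) hi else bisectGo a x lo mid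
  else lo
termination_by hi - lo
decreasing_by all_goals omega

def bisectLeft (a : List Int) (x : Int) : Nat := bisectGo a x 0 a.length

-- ===== PORT A =====
def find_bounds (l : List Int) (low : Int) (high : Int) : List Int :=
  let i := bisectLeft l low
  -- 'if i == len(l): yield from []' yields nothing; transliterated as the empty contribution
  let init : List Int := if i = l.length then [] ++ [] else []
  ((PySem.List.pyRange (i : Int) (l.length : Int) 1).foldl
    (fun st j =>
      if st.1 then st
      else
        let v := PySem.List.pyGetD l j 0  -- l[j]; j is always in range here
        if v ≥ high then (true, st.2) else (false, st.2 ++ [v]))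
    (false, init)).2

-- ===== PORT B =====
def find_bounds_alt (l : List Int) (low : Int) (high : Int) : List Int :=
  let i := bisectLeft l low
  let j := bisectLeft l high
  PySem.List.slice l (some (i : Int)) (some (j : Int))

-- ===== PRECONDITION & SPEC =====
-- Pre_ excludes lists in which some element ≥ high precedes an element < high — only unsorted
-- input, outside the docstring's sorted contract, can be such; there the index bisect_left
-- reports is an accident of binary search on unordered data, so A's value (and B's) is arbitrary.
def Pre_find_bounds (l : List Int) (_low : Int) (high : Int) : Prop :=
  l.Pairwise (fun a b => a < high ∨ high ≤ b)
instance (l : List Int) (low : Int) (high : Int) : Decidable (Pre_find_bounds l low high) := by unfold Pre_find_bounds; infer_instance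
def pvWitness_find_bounds : List Int × Int × Int := ([1, 2, 2, 5, 9], 2, 6)
def Spec_find_bounds (l : List Int) (low : Int) (high : Int) (out : List Int) : Prop := out = find_bounds_alt l low high
instance (l : List Int) (low : Int) (high : Int) (out : List Int) : Decidable (Spec_find_bounds l low high out) := by unfold Spec_find_bounds; infer_instance

-- ===== CLAIM (what is proved, stated in full; the proofs are below) =====
def Claim_equal_find_bounds : Prop := ∀ (l : List Int) (low : Int) (high : Int), Dom_find_bounds l low high → Pre_find_bounds l low high → Spec_find_bounds l low high (find_bounds l low high)

-- ===== LEMMAS AND PROOFS =====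

-- The break-flag fold over any list equals appending its takeWhile-below-high prefix.
theorem foldl_break_takeWhile (high : Int) (ys : List Int) (acc : List Int) :
    (ys.foldl (fun (st : Bool × List Int) v =>
        if st.1 then st else if v ≥ high then (true, st.2) else (false, st.2 ++ [v]))
      (false, acc)).2 = acc ++ ys.takeWhile (fun x => decide (x < high)) := by
  induction ys generalizing acc with
  | nil => simp
  | cons y ys ih =>
    by_cases hy : y ≥ high
    · have hstop : ∀ (zs : List Int) (st : Bool × List Int), st.1 = true →
          (zs.foldl (fun (st : Bool × List Int) v =>
            if st.1 then st else if v ≥ high then (true, st.2) else (false, st.2 ++ [v])) st) = st := by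
        intro zs
        induction zs with
        | nil => intro st _; rfl
        | cons z zs ihz => intro st hst; simp [List.foldl_cons, hst]; exact ihz _ hst
      simp only [List.foldl_cons, List.takeWhile_cons]
      have hlt : ¬ y < high := not_lt.mpr hy
      simp [hy, hlt, hstop _ (true, acc) rfl]
    · have hlt : y < high := lt_of_not_ge hy
      simp only [List.foldl_cons, List.takeWhile_cons]
      have hstep : (if (false : Bool) = true then ((false : Bool), acc)
          else if y ≥ high then (true, acc) else (false, acc ++ [y])) = (false, acc ++ [y]) := by
        simp [hy]
      rw [hstep, ih (acc ++ [y])]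
      simp [hlt]

-- c l x := length of the below-x prefix of l.
def twLen (l : List Int) (x : Int) : Nat := (l.takeWhile (fun y => decide (y < x))).length

theorem twLen_le (l : List Int) (x : Int) : twLen l x ≤ l.length :=
  (List.takeWhile_sublist _).length_le

-- every index strictly below twLen satisfies the predicate
theorem getD_lt_of_lt_twLen (l : List Int) (x : Int) {k : Nat} (hk : k < twLen l x) :
    l.getD k 0 < x := by
  induction l generalizing k with
  | nil => simp [twLen] at hk
  | cons a l ih =>
    by_cases ha : a < x
    · cases k with
      | zero => simpa using ha
      | succ k =>
        have hk' : k < twLen l x := by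
          simpa [twLen, List.takeWhile_cons, ha] using hk
        simpa using ih hk'
    · simp [twLen, ha] at hk
  
-- on a partitioned list, every index at or beyond twLen fails the predicate
theorem getD_ge_of_twLen_le (l : List Int) (x : Int) (hs : l.Pairwise (fun a b => a < x ∨ x ≤ b))
    {k : Nat} (hk1 : twLen l x ≤ k) (hk2 : k < l.length) : x ≤ l.getD k 0 := by
  induction l generalizing k with
  | nil => simp at hk2
  | cons a l ih =>
    by_cases ha : a < x
    · cases k with
      | zero => simp [twLen, ha] at hk1
      | succ k =>
        have hk1' : twLen l x ≤ k := by
          simpa [twLen, List.takeWhile_cons, ha] using hk1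
        simpa using ih hs.tail hk1' (by simpa using hk2)
    · cases k with
      | zero => simpa using le_of_not_gt ha
      | succ k =>
        have hmem : l.getD k 0 ∈ l := by
          rw [List.getD_eq_getElem l 0 (by simpa using hk2)]
          exact List.getElem_mem _
        rcases (List.pairwise_cons.mp hs).1 _ hmem with h | h
        · exact absurd h ha
        · simpa using h

-- bisectGo converges to twLen when the invariant lo ≤ twLen ≤ hi ≤ len holds
theorem bisectGo_eq_twLen (l : List Int) (x : Int) (hs : l.Pairwise (fun a b => a < x ∨ x ≤ b)) :
    ∀ lo hi : Nat, lo ≤ twLen l x → twLen l x ≤ hi → hi ≤ l.length →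
      bisectGo l x lo hi = twLen l x := by
  intro lo hi
  induction hn : hi - lo using Nat.strong_induction_on generalizing lo hi with
  | _ n ih =>
    intro h1 h2 h3
    rw [bisectGo]
    by_cases hlt : lo < hi
    · simp only [dif_pos hlt]
      have hmidlt : (lo + hi) / 2 < hi := by omega
      by_cases hc : l.getD ((lo + hi) / 2) 0 < x
      · rw [if_pos hc]
        have hmid : (lo + hi) / 2 < twLen l x := by
          by_contra hge
          exact absurd (getD_ge_of_twLen_le l x hs (by omega) (by omega)) (not_le.mpr hc)
        exact ih (hi - ((lo + hi) / 2 + 1)) (by omega) _ _ rfl (by omega) h2 h3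
      · rw [if_neg hc]
        have hmid : twLen l x ≤ (lo + hi) / 2 := by
          by_contra hge
          exact hc (getD_lt_of_lt_twLen l x (by omega))
        exact ih ((lo + hi) / 2 - lo) (by omega) _ _ rfl h1 hmid (by omega)
    · simp only [dif_neg hlt]
      omega

theorem bisectLeft_eq_twLen (l : List Int) (x : Int) (hs : l.Pairwise (fun a b => a < x ∨ x ≤ b)) :
    bisectLeft l x = twLen l x :=
  bisectGo_eq_twLen l x hs 0 l.length (Nat.zero_le _) (twLen_le l x) (le_refl _)

-- on a sorted list every element of the dropWhile suffix fails the predicate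
theorem dropWhile_all_ge (l : List Int) (x : Int) (hs : l.Pairwise (fun a b => a < x ∨ x ≤ b)) :
    ∀ y ∈ l.dropWhile (fun y => decide (y < x)), x ≤ y := by
  induction l with
  | nil => simp
  | cons a l ih =>
    by_cases ha : a < x
    · simpa [List.dropWhile_cons, ha] using ih hs.tail
    · intro y hy
      rw [List.dropWhile_cons, if_neg (by simpa using ha)] at hy
      rcases List.mem_cons.mp hy with h | h
      · omega
      · rcases (List.pairwise_cons.mp hs).1 _ h with h' | h'
        · exact absurd h' ha
        · exact h'

-- takeWhile over an append whose first part wholly satisfies p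
theorem takeWhile_append_all {α : Type} (p : α → Bool) (as bs : List α)
    (h : ∀ a ∈ as, p a = true) :
    (as ++ bs).takeWhile p = as ++ bs.takeWhile p := by
  induction as with
  | nil => simp
  | cons a as ih =>
    have ha := h a (List.mem_cons_self)
    simp [ha, ih (fun a ha => h a (List.mem_cons_of_mem _ ha))]

-- takeWhile is empty when every element fails p
theorem takeWhile_nil_of_all {α : Type} (p : α → Bool) (zs : List α)
    (h : ∀ y ∈ zs, p y = false) : zs.takeWhile p = [] := by
  cases zs with
  | nil => rfl
  | cons a zs => simp [h a List.mem_cons_self]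

-- main structural lemma: on a sorted list, scanning below high from index i equals the slice up to twLen l high
theorem takeWhile_drop_eq (l : List Int) (high : Int)
    (hs : l.Pairwise (fun a b => a < high ∨ high ≤ b)) (i : Nat) :
    (l.drop i).takeWhile (fun x => decide (x < high))
      = (l.takeWhile (fun x => decide (x < high))).drop i := by
  have hsplit : l = l.takeWhile (fun x => decide (x < high)) ++ l.dropWhile (fun x => decide (x < high)) :=
    (List.takeWhile_append_dropWhile).symm
  conv_lhs => rw [hsplit]
  rw [List.drop_append]
  rw [takeWhile_append_all _ _ _ (by
    intro a ha
    exact List.mem_takeWhile_imp (p := fun x => decide (x < high)) (l := l) (List.mem_of_mem_drop ha))]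
  have hnone : (List.dropWhile (fun x => decide (x < high)) l |>.drop
      (i - (l.takeWhile (fun x => decide (x < high))).length)).takeWhile (fun x => decide (x < high)) = [] := by
    apply takeWhile_nil_of_all
    intro y hy
    have := dropWhile_all_ge l high hs y (List.mem_of_mem_drop hy)
    simp only [decide_eq_false_iff_not]
    omega
  rw [hnone, List.append_nil]

-- ===== VERDICT (by name: the statement is the Claim_ definition above) =====
theorem find_bounds_spec : Claim_equal_find_bounds := by
  intro l low high _ hs
  unfold Spec_find_bounds find_bounds find_bounds_alt
  set i := bisectLeft l low with hi
  show ((PySem.List.pyRange (i : Int) (l.length : Int) 1).foldl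
      (fun (st : Bool × List Int) j =>
        if st.1 then st
        else if PySem.List.pyGetD l j 0 ≥ high then (true, st.2) else (false, st.2 ++ [PySem.List.pyGetD l j 0]))
      (false, if i = l.length then [] ++ [] else [])).2
    = PySem.List.slice l (some (i : Int)) (some ((bisectLeft l high : Nat) : Int))
  have hinit : (if i = l.length then ([] : List Int) ++ [] else []) = [] := by
    split <;> rfl
  rw [hinit]
  rw [PySem.List.foldl_pyRange_pyGetD' l 0
        (fun (st : Bool × List Int) v =>
          if st.1 then st else if v ≥ high then (true, st.2) else (false, st.2 ++ [v]))
        ((false : Bool), ([] : List Int)) (a := (i : Int)) (by positivity)]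
  rw [foldl_break_takeWhile, PySem.List.slice_natCast]
  rw [bisectLeft_eq_twLen l high hs, Int.toNat_natCast, List.nil_append]
  rw [takeWhile_drop_eq l high hs i]
  have htake : l.takeWhile (fun x => decide (x < high)) = l.take (twLen l high) :=
    List.prefix_iff_eq_take.mp (List.takeWhile_prefix _)
  rw [htake, List.drop_take]
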